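-- pv_equiv track=rewrite | github.com/elsander/RecurseCenter | Recursion/Recursion.py | cardhand
-- ===== SOURCE A (Python) =====
-- import copy
--
-- def cardhand(hand, handsize = 5):
--     if len(hand) == 0:
--         return ['']
--     elif handsize == 0:
--         return ['']
--     elif len(hand) == handsize:
--         return hand
--     handlist = []
--     handcopy = copy.deepcopy(hand)
--     for card in hand:
--         ## pop card
--         handcopy = handcopy[1:]
--         smallhands = cardhand(hand, handsize - 1)
--         for item in smallhands:
--             handlist.append(card + item)
--     return handlist
-- ===== SOURCE B (Python) =====
-- def cardhand(hand, handsize=5):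
--     # Bottom-up: build each level once from the previous one, instead of
--     # recomputing the whole recursion once per card at every level.
--     if len(hand) == 0 or handsize == 0:
--         return ['']
--     n = len(hand)
--     if n == handsize:
--         return hand
--     if handsize > n:
--         cur, level = hand, n + 1
--     else:
--         cur, level = [''], 1
--     for _ in range(level, handsize + 1):
--         cur = [card + item for card in hand for item in cur]
--     return cur
-- ===== Notes on version B (the rewrite author's own statement) =====
-- stated objective: faster
-- what changed: A recomputes the full recursive call cardhand(hand, handsize-1) once per card at every level; B builds the combinations bottom-up with a single loop, computing each level exactly once from the previous one.
import Mathlib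
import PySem

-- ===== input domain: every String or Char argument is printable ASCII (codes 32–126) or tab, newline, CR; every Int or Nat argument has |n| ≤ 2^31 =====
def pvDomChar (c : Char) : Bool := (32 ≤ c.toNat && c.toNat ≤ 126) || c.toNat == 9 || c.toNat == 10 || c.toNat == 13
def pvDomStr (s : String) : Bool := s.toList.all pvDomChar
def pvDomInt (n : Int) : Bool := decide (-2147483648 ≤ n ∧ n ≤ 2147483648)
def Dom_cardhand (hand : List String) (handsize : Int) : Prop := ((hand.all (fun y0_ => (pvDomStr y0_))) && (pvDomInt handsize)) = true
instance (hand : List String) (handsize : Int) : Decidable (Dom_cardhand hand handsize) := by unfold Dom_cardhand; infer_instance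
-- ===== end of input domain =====

-- B replaces A's per-card recomputation of the recursive call by a bottom-up loop that
-- builds each level once from the previous one (objective: faster, asymptotic).


-- ===== PORT A =====
-- fuel = handsize.toNat; the fuel-0 default [""] is reached inside Pre_ only when
-- handsize = 0 (where Python also returns ['']) — for negative handsize with a
-- nonempty hand the Python recursion diverges (RecursionError), outside Pre_.
def cardhandGo (hand : List String) (fuel : Nat) (handsize : Int) : List String :=
  match fuel with
  | 0 => [""]
  | f + 1 =>
    if hand.length = 0 then [""]
    else if handsize = 0 then [""]
    else if (hand.length : Int) = handsize then hand
    else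
      -- state = (handcopy, handlist); handcopy = handcopy[1:] is A's dead slicing
      (hand.foldl
        (fun st card =>
          (PySem.List.slice st.1 (some 1) none,
           st.2 ++ (cardhandGo hand f (handsize - 1)).map (fun item => card ++ item)))
        (hand, ([] : List String))).2

def cardhand (hand : List String) (handsize : Int) : List String :=
  cardhandGo hand handsize.toNat handsize

-- ===== PORT B =====
def cardhand_alt (hand : List String) (handsize : Int) : List String :=
  if hand.length = 0 ∨ handsize = 0 then [""]
  else
    let n : Int := hand.length
    if n = handsize then hand
    else
      let p : List String × Int := if handsize > n then (hand, n + 1) else ([""], 1)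
      (PySem.List.pyRange p.2 (handsize + 1) 1).foldl
        (fun cur _ => hand.flatMap (fun card => cur.map (fun item => card ++ item))) p.1

-- ===== PRECONDITION & SPEC =====
-- Pre_ excludes only inputs where A raises: negative handsize with a nonempty hand
-- makes A recurse forever (RecursionError).
def Pre_cardhand (hand : List String) (handsize : Int) : Prop :=
  hand = [] ∨ 0 ≤ handsize
instance (hand : List String) (handsize : Int) : Decidable (Pre_cardhand hand handsize) := by
  unfold Pre_cardhand; infer_instance

def pvWitness_cardhand : List String × Int := (["a", "b"], 3)

def Spec_cardhand (hand : List String) (handsize : Int) (out : List String) : Prop :=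
  out = cardhand_alt hand handsize
instance (hand : List String) (handsize : Int) (out : List String) : Decidable (Spec_cardhand hand handsize out) := by unfold Spec_cardhand; infer_instance

-- ===== CLAIM (what is proved, stated in full; the proofs are below) =====
def Claim_equal_cardhand : Prop := ∀ (hand : List String) (handsize : Int), Dom_cardhand hand handsize → Pre_cardhand hand handsize → Spec_cardhand hand handsize (cardhand hand handsize)


-- ===== LEMMAS AND PROOFS =====

-- one level of B's loop
def hstep (hand cur : List String) : List String :=
  hand.flatMap (fun card => cur.map (fun item => card ++ item))

-- the second component of A's pair-fold ignores the dead handcopy slicing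
theorem pairFoldl_snd (l : List String) (sm : List String) (c0 : List String) (acc : List String) :
    (l.foldl (fun st card =>
        (PySem.List.slice st.1 (some 1) none,
         st.2 ++ sm.map (fun item => card ++ item))) (c0, acc)).2
      = acc ++ l.flatMap (fun card => sm.map (fun item => card ++ item)) := by
  induction l generalizing c0 acc with
  | nil => simp
  | cons x xs ih => simp [List.foldl, ih]

theorem alt_zero (hand : List String) : cardhand_alt hand 0 = [""] := by
  simp [cardhand_alt]

theorem alt_succ (hand : List String) (k : Nat) (hne : hand ≠ [])
    (hlen : hand.length ≠ k + 1) :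
    cardhand_alt hand ((k : Int) + 1) = hstep hand (cardhand_alt hand (k : Int)) := by
  have hn : 0 < hand.length := List.length_pos_iff.mpr hne
  unfold cardhand_alt
  have h1 : ¬ (hand.length = 0 ∨ (k : Int) + 1 = 0) := by
    push_neg; exact ⟨by omega, by omega⟩
  have h2 : ¬ ((hand.length : Int) = (k : Int) + 1) := by
    intro h; exact hlen (by exact_mod_cast h)
  rw [if_neg h1, if_neg h2]
  by_cases hk0 : k = 0
  · subst hk0
    simp only [Nat.cast_zero]
    rw [if_neg (show ¬ ((0 : Int) + 1 > (hand.length : Int)) by omega)]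
    have hr : PySem.List.pyRange (1 : Int) (0 + 1 + 1) = [1] := by decide
    rw [hr]
    simp [hstep]
  · have h1' : ¬ (hand.length = 0 ∨ (k : Int) = 0) := by
      push_neg; exact ⟨by omega, by exact_mod_cast hk0⟩
    rw [if_neg h1']
    by_cases hEq : (hand.length : Int) = (k : Int)
    · -- k = n : previous level is hand itself
      rw [if_pos hEq]
      have hgt : (k : Int) + 1 > (hand.length : Int) := by omega
      rw [if_pos hgt]
      simp only [hEq]
      rw [PySem.List.pyRange_one_singleton]
      simp [hstep]
    · rw [if_neg hEq]
      by_cases hgt : (k : Int) > (hand.length : Int)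
      · -- k > n : both levels loop from hand starting at n+1
        have hgt1 : (k : Int) + 1 > (hand.length : Int) := by omega
        rw [if_pos hgt, if_pos hgt1]
        simp only
        rw [PySem.List.pyRange_one_succ_right (show ((hand.length : Int) + 1) ≤ (k : Int) + 1 by omega), List.foldl_append]
        simp [hstep]
      · -- k < n : both levels loop from [''] starting at 1
        have hlt : ¬ ((k : Int) + 1 > (hand.length : Int)) := by omega
        rw [if_neg hgt, if_neg hlt]
        simp only
        rw [PySem.List.pyRange_one_succ_right (show (1 : Int) ≤ (k : Int) + 1 by omega), List.foldl_append]
        simp [hstep]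

theorem go_eq_alt (hand : List String) (k : Nat) :
    cardhandGo hand k (k : Int) = cardhand_alt hand (k : Int) := by
  induction k with
  | zero => simp [cardhandGo, alt_zero]
  | succ k ih =>
    unfold cardhandGo
    by_cases hne : hand.length = 0
    · have : hand = [] := List.length_eq_zero_iff.mp hne
      subst this
      simp [cardhand_alt]
    · rw [if_neg hne]
      have hk1 : ¬ ((k : Int) + 1 = 0) := by omega
      push_cast
      rw [if_neg hk1]
      by_cases hEq : (hand.length : Int) = (k : Int) + 1
      · rw [if_pos hEq]
        unfold cardhand_alt
        rw [if_neg (by push_neg; exact ⟨hne, hk1⟩), if_pos hEq]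
      · rw [if_neg hEq]
        have hne' : hand ≠ [] := fun h => hne (by simp [h])
        have hlen : hand.length ≠ k + 1 := by
          intro h; exact hEq (by exact_mod_cast h)
        rw [alt_succ hand k hne' hlen]
        have : (k : Int) + 1 - 1 = (k : Int) := by ring
        rw [this, pairFoldl_snd]
        simp [hstep, ih]

-- ===== VERDICT (by name: the statement is the Claim_ definition above) =====
theorem cardhand_spec : Claim_equal_cardhand := by
  intro hand handsize _ hpre
  unfold Spec_cardhand cardhand
  rcases hpre with h | h
  · subst h
    rcases Int.lt_or_le handsize 0 with hneg | hge
    · have : handsize.toNat = 0 := Int.toNat_of_nonpos (by omega)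
      rw [this]
      simp [cardhandGo, cardhand_alt]
    · obtain ⟨k, rfl⟩ := Int.eq_ofNat_of_zero_le hge
      have : ((k : Int)).toNat = k := Int.toNat_natCast k
      rw [this, go_eq_alt]
  · obtain ⟨k, rfl⟩ := Int.eq_ofNat_of_zero_le h
    have : ((k : Int)).toNat = k := Int.toNat_natCast k
    rw [this, go_eq_alt]
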